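-- pv_equiv track=rewrite | github.com/MrBrantCode/unitest_baseline | mut_generate/mist_train_cf/cf_72085/solution.py | isomorphic_strings_and_substrings
-- ===== SOURCE A (Python) =====
-- def isomorphic_strings_and_substrings(s, t):
--     def is_isomorphic(s, t):
--         dict_s = {}
--         dict_t = {}
--         for i in range(len(s)):
--             if (s[i] in dict_s and dict_s[s[i]] != t[i]) or (t[i] in dict_t and dict_t[t[i]] != s[i]):
--                 return False
--             dict_s[s[i]] = t[i]
--             dict_t[t[i]] = s[i]
--         return True
--
--     def find_substring(s, t):
--         length = len(s)
--         for l in range(length, 0, -1):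
--             for i in range(length - l + 1):
--                 sub_s, sub_t = s[i: i+l], t[i: i+l]
--                 if is_isomorphic(sub_s, sub_t):
--                     return sub_s, sub_t
--         return '', ''
--
--     is_isomorphic_str = is_isomorphic(s, t)
--     substr_s, substr_t = find_substring(s, t) if is_isomorphic_str else ('', '')
--     return is_isomorphic_str, substr_s, substr_t
-- ===== SOURCE B (Python) =====
-- def isomorphic_strings_and_substrings(s, t):
--     st, ts = {}, {}
--     for i in range(len(s)):
--         a, b = s[i], t[i]
--         if st.setdefault(a, b) != b or ts.setdefault(b, a) != a:
--             return (False, '', '')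
--     return (True, s, t[:len(s)])
-- ===== Notes on version B (the rewrite author's own statement) =====
-- stated objective: simpler
-- what changed: B drops A's nested find_substring search entirely: a single two-dict pass decides isomorphism, and on success B returns (True, s, t[:len(s)]) directly, since A's substring search always succeeds at its very first candidate (the full aligned prefix).
-- outside the precondition, e.g. on isomorphic_strings_and_substrings('aab', 'xy'): A returns (False, '', ''), B returns (False, '', '')
import Mathlib
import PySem

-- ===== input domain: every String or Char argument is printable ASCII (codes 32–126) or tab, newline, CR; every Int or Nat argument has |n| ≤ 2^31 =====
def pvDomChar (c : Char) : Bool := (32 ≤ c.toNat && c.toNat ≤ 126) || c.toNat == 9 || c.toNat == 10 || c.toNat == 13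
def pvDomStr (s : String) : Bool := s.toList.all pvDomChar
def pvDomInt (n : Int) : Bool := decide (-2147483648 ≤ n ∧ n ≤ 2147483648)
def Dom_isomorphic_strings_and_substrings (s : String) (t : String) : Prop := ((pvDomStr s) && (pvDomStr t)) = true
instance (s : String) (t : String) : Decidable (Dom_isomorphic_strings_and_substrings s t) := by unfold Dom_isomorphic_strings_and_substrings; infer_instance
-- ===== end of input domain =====

-- B replaces A's nested substring search by a direct return of the full aligned prefix (objective: simpler).

-- ===== PORT A =====
-- is_isomorphic's loop: 'for i in range(len(s))' over the index list, two dicts;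
-- t[i] is PySem.List.pyGet? — the 'none' branch is Python's IndexError (excluded by Pre_)
def pvIsoLoop (sc tc : List Char) : List Nat → PySem.Dict Char Char → PySem.Dict Char Char → Bool
  | [], _, _ => true
  | i :: rest, ds, dt =>
    match PySem.List.pyGet? sc (i : Int), PySem.List.pyGet? tc (i : Int) with
    | some a, some b =>
      if (ds.contains a && ds.getD a b != b) || (dt.contains b && dt.getD b a != a) then false
      else pvIsoLoop sc tc rest (ds.insert a b) (dt.insert b a)
    | _, _ => false   -- IndexError (outside Pre_)

def pvIsIsomorphic (sc tc : List Char) : Bool :=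
  pvIsoLoop sc tc (List.range sc.length) PySem.Dict.empty PySem.Dict.empty

-- find_substring's inner loop: 'for i in range(length - l + 1)', early return as Option
def pvFindInner (sc tc : List Char) (l : Nat) : List Nat → Option (List Char × List Char)
  | [] => none
  | i :: rest =>
    let subS := PySem.List.slice sc (some (i : Int)) (some ((i : Int) + (l : Int)))
    let subT := PySem.List.slice tc (some (i : Int)) (some ((i : Int) + (l : Int)))
    if pvIsIsomorphic subS subT then some (subS, subT) else pvFindInner sc tc l rest

-- find_substring's outer loop: 'for l in range(length, 0, -1)'
def pvFindOuter (sc tc : List Char) (length : Nat) : List Int → List Char × List Char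
  | [] => ([], [])
  | l :: rest =>
    match pvFindInner sc tc l.toNat (List.range (length - l.toNat + 1)) with
    | some r => r
    | none => pvFindOuter sc tc length rest

def pvFindSubstring (sc tc : List Char) : List Char × List Char :=
  pvFindOuter sc tc sc.length (PySem.List.pyRange (sc.length : Int) 0 (-1))

def isomorphic_strings_and_substrings (s : String) (t : String) : Bool × String × String :=
  let sc := s.toList
  let tc := t.toList
  let iso := pvIsIsomorphic sc tc
  let r := if iso then pvFindSubstring sc tc else ([], [])
  (iso, String.ofList r.1, String.ofList r.2)

-- ===== PORT B =====
-- single pass, setdefault on both dicts, direct early return of the whole tuple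
def pvAltLoop (sc tc : List Char) : List Nat → PySem.Dict Char Char → PySem.Dict Char Char → Bool
  | [], _, _ => true
  | i :: rest, st, ts =>
    match PySem.List.pyGet? sc (i : Int), PySem.List.pyGet? tc (i : Int) with
    | some a, some b =>
      -- st.setdefault(a, b) returns (st.get? a).getD b and inserts b when a was absent
      if ((st.get? a).getD b != b) || ((ts.get? b).getD a != a) then false
      else pvAltLoop sc tc rest (st.setdefault a b) (ts.setdefault b a)
    | _, _ => false   -- IndexError (outside Pre_)

def isomorphic_strings_and_substrings_alt (s : String) (t : String) : Bool × String × String :=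
  let sc := s.toList
  let tc := t.toList
  if pvAltLoop sc tc (List.range sc.length) PySem.Dict.empty PySem.Dict.empty then
    (true, s, String.ofList (tc.take sc.length))   -- t[:len(s)]
  else
    (false, "", "")

-- ===== PRECONDITION & SPEC =====
-- Pre_ excludes len(t) < len(s), where A's t[i] can raise IndexError; on the excluded inputs where an
-- earlier mismatch makes A return (False, '', '') before reaching the bad index, B returns the same value.
def Pre_isomorphic_strings_and_substrings (s : String) (t : String) : Prop :=
  s.toList.length ≤ t.toList.length
instance (s : String) (t : String) : Decidable (Pre_isomorphic_strings_and_substrings s t) := by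
  unfold Pre_isomorphic_strings_and_substrings; infer_instance

def pvWitness_isomorphic_strings_and_substrings : String × String := ("ab", "ba")

def Spec_isomorphic_strings_and_substrings (s : String) (t : String) (out : Bool × String × String) : Prop := out = isomorphic_strings_and_substrings_alt s t
instance (s : String) (t : String) (out : Bool × String × String) : Decidable (Spec_isomorphic_strings_and_substrings s t out) := by unfold Spec_isomorphic_strings_and_substrings; infer_instance

-- ===== CLAIM (what is proved, stated in full; the proofs are below) =====
def Claim_equal_isomorphic_strings_and_substrings : Prop := ∀ (s : String) (t : String), Dom_isomorphic_strings_and_substrings s t → Pre_isomorphic_strings_and_substrings s t → Spec_isomorphic_strings_and_substrings s t (isomorphic_strings_and_substrings s t)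

-- ===== LEMMAS AND PROOFS =====

-- overwriting a key with the value it already has is a no-op (keys unique)
lemma pv_insert_self_of_get? (d : PySem.Dict Char Char) (k v : Char)
    (hn : d.keys.Nodup) (h : d.get? k = some v) : d.insert k v = d := by
  have hc : d.contains k = true := by
    rw [PySem.Dict.contains_eq_isSome_get?, h]; rfl
  apply PySem.Dict.ext
  rw [PySem.Dict.items_insert_of_contains _ _ hc]
  have hid : ∀ p ∈ d.items, (if (p.1 == k) = true then (k, v) else p) = p := by
    intro p hp
    obtain ⟨p1, p2⟩ := p
    by_cases hk : p1 = k
    · subst hk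
      have h2 : d.get? p1 = some p2 := PySem.Dict.get?_of_mem_items d hp hn
      have hv : p2 = v := by rw [h2] at h; exact Option.some.inj h
      simp [hv]
    · simp [hk]
  rw [List.map_congr_left hid]
  simp

-- A's is_isomorphic loop equals B's setdefault loop (from dicts with unique keys)
lemma pvLoop_eq (sc tc : List Char) (idxs : List Nat) :
    ∀ ds dt : PySem.Dict Char Char, ds.keys.Nodup → dt.keys.Nodup →
      pvIsoLoop sc tc idxs ds dt = pvAltLoop sc tc idxs ds dt := by
  induction idxs with
  | nil => intro ds dt _ _; rfl
  | cons i rest ih =>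
    intro ds dt hds hdt
    simp only [pvIsoLoop, pvAltLoop]
    cases hga : PySem.List.pyGet? sc (i : Int) with
    | none => rfl
    | some a =>
      cases hgb : PySem.List.pyGet? tc (i : Int) with
      | none => rfl
      | some b =>
        dsimp only
        cases hsa : ds.get? a with
        | none =>
          have hA : ds.contains a = false := by
            rw [PySem.Dict.contains_eq_isSome_get?, hsa]; rfl
          cases hsb : dt.get? b with
          | none =>
            have hB : dt.contains b = false := by
              rw [PySem.Dict.contains_eq_isSome_get?, hsb]; rfl
            rw [PySem.Dict.setdefault_of_not_contains _ _ hA,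
                PySem.Dict.setdefault_of_not_contains _ _ hB]
            simp only [hA, hB, Option.getD_none, Bool.false_and, Bool.or_self,
              bne_self_eq_false, Bool.false_eq_true, if_false]
            exact ih _ _ (PySem.Dict.nodup_keys_insert _ _ _ hds)
              (PySem.Dict.nodup_keys_insert _ _ _ hdt)
          | some w =>
            have hB : dt.contains b = true := by
              rw [PySem.Dict.contains_eq_isSome_get?, hsb]; rfl
            by_cases hw : w = a
            · rw [hw] at hsb
              rw [PySem.Dict.setdefault_of_not_contains _ _ hA,
                  PySem.Dict.setdefault_of_contains _ _ hB,
                  pv_insert_self_of_get? dt b a hdt hsb]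
              simp only [hw, hA, hB, hsa, hsb, Option.getD_none, Option.getD_some,
                PySem.Dict.getD_eq_get?_getD, Bool.false_and, Bool.true_and,
                bne_self_eq_false, Bool.or_self, Bool.or_false, Bool.false_or,
                Bool.false_eq_true, if_false]
              exact ih _ _ (PySem.Dict.nodup_keys_insert _ _ _ hds) hdt
            · have hwa : (w != a) = true := by simp [hw]
              simp [hA, hB, hsa, hsb, PySem.Dict.getD_eq_get?_getD, hwa]
        | some v =>
          have hA : ds.contains a = true := by
            rw [PySem.Dict.contains_eq_isSome_get?, hsa]; rfl
          by_cases hv : v = b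
          · rw [hv] at hsa
            cases hsb : dt.get? b with
            | none =>
              have hB : dt.contains b = false := by
                rw [PySem.Dict.contains_eq_isSome_get?, hsb]; rfl
              rw [PySem.Dict.setdefault_of_contains _ _ hA,
                  PySem.Dict.setdefault_of_not_contains _ _ hB,
                  pv_insert_self_of_get? ds a b hds hsa]
              simp only [hv, hA, hB, hsa, hsb, Option.getD_none, Option.getD_some,
                PySem.Dict.getD_eq_get?_getD, Bool.false_and, Bool.true_and,
                bne_self_eq_false, Bool.or_self, Bool.or_false, Bool.false_or,
                Bool.false_eq_true, if_false]
              exact ih _ _ hds (PySem.Dict.nodup_keys_insert _ _ _ hdt)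
            | some w =>
              have hB : dt.contains b = true := by
                rw [PySem.Dict.contains_eq_isSome_get?, hsb]; rfl
              by_cases hw : w = a
              · rw [hw] at hsb
                rw [PySem.Dict.setdefault_of_contains _ _ hA,
                    PySem.Dict.setdefault_of_contains _ _ hB,
                    pv_insert_self_of_get? ds a b hds hsa,
                    pv_insert_self_of_get? dt b a hdt hsb]
                simp only [hv, hw, hA, hB, hsa, hsb, Option.getD_some,
                  PySem.Dict.getD_eq_get?_getD, Bool.true_and,
                  bne_self_eq_false, Bool.or_self, Bool.false_eq_true, if_false]
                exact ih _ _ hds hdt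
              · have hwa : (w != a) = true := by simp [hw]
                simp [hA, hB, hsa, hsb, PySem.Dict.getD_eq_get?_getD, hwa]
          · have hvb : (v != b) = true := by simp [hv]
            simp [hA, hsa, PySem.Dict.getD_eq_get?_getD, hvb]

-- the loop only reads tc below the index bound: tc may be truncated to that bound
lemma pvIsoLoop_take (sc tc : List Char) (n : Nat) (idxs : List Nat)
    (hidx : ∀ i ∈ idxs, i < n) :
    ∀ ds dt, pvIsoLoop sc (tc.take n) idxs ds dt = pvIsoLoop sc tc idxs ds dt := by
  induction idxs with
  | nil => intro ds dt; rfl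
  | cons i rest ih =>
    intro ds dt
    have hi : i < n := hidx i (List.mem_cons_self)
    have hrest : ∀ j ∈ rest, j < n := fun j hj => hidx j (List.mem_cons_of_mem _ hj)
    simp only [pvIsoLoop, PySem.List.pyGet?_natCast, List.getElem?_take_of_lt hi]
    cases sc[i]? with
    | none => rfl
    | some a =>
      cases tc[i]? with
      | none => rfl
      | some b =>
        dsimp only
        split
        · rfl
        · exact ih hrest _ _

lemma pv_range_lt (n : Nat) : ∀ i ∈ List.range n, i < n := fun i hi => List.mem_range.mp hi

-- ===== VERDICT (by name: the statement is the Claim_ definition above) =====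
theorem isomorphic_strings_and_substrings_spec : Claim_equal_isomorphic_strings_and_substrings := by
  intro s t _ hpre
  unfold Spec_isomorphic_strings_and_substrings
  unfold Pre_isomorphic_strings_and_substrings at hpre
  unfold isomorphic_strings_and_substrings isomorphic_strings_and_substrings_alt
  simp only []
  have hloop : pvIsIsomorphic s.toList t.toList
      = pvAltLoop s.toList t.toList (List.range s.toList.length) PySem.Dict.empty PySem.Dict.empty := by
    unfold pvIsIsomorphic
    exact pvLoop_eq _ _ _ _ _ PySem.Dict.nodup_keys_empty PySem.Dict.nodup_keys_empty
  rw [← hloop]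
  cases hiso : pvIsIsomorphic s.toList t.toList with
  | false => simp [hiso]
  | true =>
    simp only [hiso, if_true]
    cases hlen : s.toList.length with
    | zero =>
      have hsnil : s.toList = [] := List.length_eq_zero_iff.mp hlen
      have hs : s = "" := by
        have := congrArg String.ofList hsnil
        simpa using this
      unfold pvFindSubstring
      rw [hlen]
      rw [PySem.List.pyRange_neg_one_eq_nil (by norm_num)]
      have hnil : String.ofList ([] : List Char) = "" := by decide
      simp [pvFindOuter, hsnil, hs, hnil]
    | succ n =>
      unfold pvFindSubstring
      rw [hlen]
      have hcons : PySem.List.pyRange ((n + 1 : Nat) : Int) 0 (-1)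
          = ((n + 1 : Nat) : Int) :: PySem.List.pyRange (((n + 1 : Nat) : Int) - 1) 0 (-1) :=
        PySem.List.pyRange_neg_one_cons (by positivity)
      rw [hcons]
      simp only [pvFindOuter, Int.toNat_natCast]
      have hidx : n + 1 - (n + 1) + 1 = 1 := by omega
      rw [hidx]
      have hrange1 : List.range 1 = [0] := by decide
      rw [hrange1]
      simp only [pvFindInner]
      have hslS : PySem.List.slice s.toList (some ((0 : Nat) : Int)) (some (((0 : Nat) : Int) + ((n+1 : Nat) : Int)))
          = s.toList := by
        rw [PySem.List.slice_natCast_add]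
        simp [← hlen]
      have hslT : PySem.List.slice t.toList (some ((0 : Nat) : Int)) (some (((0 : Nat) : Int) + ((n+1 : Nat) : Int)))
          = t.toList.take (n+1) := by
        rw [PySem.List.slice_natCast_add]
        simp
      rw [hslS, hslT]
      have htrunc : pvIsIsomorphic s.toList (t.toList.take (n+1)) = pvIsIsomorphic s.toList t.toList := by
        unfold pvIsIsomorphic
        rw [hlen]
        exact pvIsoLoop_take _ _ _ _ (pv_range_lt _) _ _
      rw [htrunc, hiso]
      simp [hlen]
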